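-- pv_equiv track=rewrite | github.com/alibaba/feathub | python/feathub/processors/spark/dataframe_builder/datagen_utils.py | _generate_random_field_name
-- ===== SOURCE A (Python) =====
-- from typing import Callable, Any, List, Union
--
-- def _generate_random_field_name(occupied_field_names: List[str]) -> str:
--     prefix = "seed"
--     affix = 0
--     while True:
--         field_name = prefix + str(affix)
--         if field_name in occupied_field_names:
--             affix += 1
--             continue
--         return field_name
-- ===== SOURCE B (Python) =====
-- def _generate_random_field_name(occupied_field_names):
--     # One pass: collect the integers n whose canonical name "seed"+str(n) is occupied,
--     # then return the first free affix.
--     used = set()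
--     for name in occupied_field_names:
--         if name.startswith("seed"):
--             suffix = name[4:]
--             if suffix.isdigit() and (suffix == "0" or suffix[0] != "0"):
--                 n = 0
--                 for ch in suffix:
--                     n = n * 10 + (ord(ch) - 48)
--                 used.add(n)
--     affix = 0
--     while affix in used:
--         affix += 1
--     return "seed" + str(affix)
-- ===== Notes on version B (the rewrite author's own statement) =====
-- stated objective: alternative
-- what changed: A repeatedly builds 'seed'+str(affix) and scans the whole list for it, retrying affix+1 on a hit; B makes one pass over the list collecting into a set the integers n whose canonical name 'seed'+str(n) occurs (startswith 'seed', all-digit suffix, no leading zero), then counts up to the first integer not in the set.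
import Mathlib
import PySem

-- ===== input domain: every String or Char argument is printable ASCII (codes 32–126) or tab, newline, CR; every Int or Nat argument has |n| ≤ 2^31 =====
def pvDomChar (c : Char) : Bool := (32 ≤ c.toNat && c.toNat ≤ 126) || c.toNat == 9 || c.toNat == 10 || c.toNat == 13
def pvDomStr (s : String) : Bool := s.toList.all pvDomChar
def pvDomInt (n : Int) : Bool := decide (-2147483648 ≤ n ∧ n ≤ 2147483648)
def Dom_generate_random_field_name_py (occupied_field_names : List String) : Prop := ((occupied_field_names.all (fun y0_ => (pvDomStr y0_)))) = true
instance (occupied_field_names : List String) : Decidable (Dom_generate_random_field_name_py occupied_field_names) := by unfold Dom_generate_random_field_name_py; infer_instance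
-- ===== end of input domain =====

-- B replaces A's generate-and-test scan (build "seed"+str(affix), scan the whole list, retry)
-- by one pass indexing the occupied canonical seed-numbers into a set, then taking the first
-- affix not in the set (objective: alternative decomposition).

-- ===== PORT A =====
-- the while-loop of A; fuel = occupied_field_names.length + 1 always suffices (proved below),
-- the fuel-0 branch returns the current candidate exactly as the loop would
def pvALoop (occupied_field_names : List String) (affix : Nat) (fuel : Nat) : String :=
  match fuel with
  | 0 => "seed" ++ PySem.Int.toStr (affix : Int)
  | fuel + 1 =>
    let field_name := "seed" ++ PySem.Int.toStr (affix : Int)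
    if field_name ∈ occupied_field_names then
      pvALoop occupied_field_names (affix + 1) fuel
    else field_name

def generate_random_field_name_py (occupied_field_names : List String) : String :=
  pvALoop occupied_field_names 0 (occupied_field_names.length + 1)

-- ===== PORT B =====
-- name.startswith("seed") / name[4:] / isdigit / leading-zero guard / manual decimal fold, as in Source B
def pvParseSeed (name : String) : Option Nat :=
  if PySem.Str.startswith name "seed" then
    let suffix := PySem.Str.slice name (some 4) none
    if PySem.Str.strIsdigit suffix &&
        (suffix == "0" || !(PySem.Str.pyGet? suffix 0 == some '0')) then
      some (suffix.toList.foldl (fun a c => a * 10 + (c.toNat - 48)) 0)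
    else none
  else none

def pvUsed (occupied_field_names : List String) : PySem.Set Nat :=
  occupied_field_names.foldl
    (fun used name =>
      match pvParseSeed name with
      | some n => used.add n
      | none => used)
    (PySem.Set.ofList [])

-- the while-loop of B; fuel = used.length + 1 always suffices (proved below)
def pvFindFree (used : PySem.Set Nat) (affix : Nat) (fuel : Nat) : Nat :=
  match fuel with
  | 0 => affix
  | fuel + 1 => if affix ∈ used then pvFindFree used (affix + 1) fuel else affix

def generate_random_field_name_py_alt (occupied_field_names : List String) : String :=
  let used := pvUsed occupied_field_names
  "seed" ++ PySem.Int.toStr ((pvFindFree used 0 (used.length + 1) : Nat) : Int)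

-- ===== PRECONDITION & SPEC =====
def Spec_generate_random_field_name_py (occupied_field_names : List String) (out : String) : Prop := out = generate_random_field_name_py_alt occupied_field_names
instance (occupied_field_names : List String) (out : String) : Decidable (Spec_generate_random_field_name_py occupied_field_names out) := by unfold Spec_generate_random_field_name_py; infer_instance

-- ===== CLAIM (what is proved, stated in full; the proofs are below) =====
def Claim_equal_generate_random_field_name_py : Prop := ∀ (occupied_field_names : List String), Dom_generate_random_field_name_py occupied_field_names → Spec_generate_random_field_name_py occupied_field_names (generate_random_field_name_py occupied_field_names)

-- ===== LEMMAS AND PROOFS =====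

-- the canonical candidate name for affix n
def pvCand (n : Nat) : String := "seed" ++ PySem.Int.toStr (n : Int)

-- the common shape of both while-loops
def pvGenLoop (p : Nat → Bool) (affix : Nat) (fuel : Nat) : Nat :=
  match fuel with
  | 0 => affix
  | fuel + 1 => if p affix then pvGenLoop p (affix + 1) fuel else affix

-- canonical decimal digits of n, most significant first (= Nat.toDigits 10 n)
def pvDigs (n : Nat) : List Char :=
  if _h : n < 10 then [Nat.digitChar n]
  else pvDigs (n / 10) ++ [Nat.digitChar (n % 10)]
  termination_by n
  decreasing_by exact Nat.div_lt_self (by omega) (by omega)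

-- decimal value of a digit list, most significant first (Source B's fold)
def pvVal (cs : List Char) : Nat := cs.foldl (fun a c => a * 10 + (c.toNat - 48)) 0

lemma pvDigs_tdc : ∀ (f n : Nat) (acc : List Char), n < f →
    Nat.toDigitsCore 10 f n acc = pvDigs n ++ acc := by
  intro f
  induction f with
  | zero => intro n acc h; omega
  | succ f ih =>
    intro n acc h
    simp only [Nat.toDigitsCore]
    by_cases hz : n / 10 = 0
    · have hn : n < 10 := by omega
      rw [pvDigs]
      simp [hz, hn, Nat.mod_eq_of_lt hn]
    · have hn : ¬ n < 10 := by omega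
      have hlt : n / 10 < f := by
        have := Nat.div_lt_self (show 0 < n by omega) (show 1 < 10 by omega)
        omega
      rw [if_neg hz, ih (n / 10) (Nat.digitChar (n % 10) :: acc) hlt]
      conv_rhs => rw [pvDigs, dif_neg hn]
      simp

lemma pvToChars_eq (n : Nat) : PySem.Int.toChars (n : Int) = pvDigs n := by
  simp only [PySem.Int.toChars]
  rw [if_neg (by omega)]
  simp only [Int.toNat_natCast, Nat.toDigits]
  rw [pvDigs_tdc (n + 1) n [] (by omega), List.append_nil]

lemma pvCand_toList (n : Nat) : (pvCand n).toList = 's' :: 'e' :: 'e' :: 'd' :: pvDigs n := by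
  have h1 : ("seed" : String).toList = ['s', 'e', 'e', 'd'] := by decide
  rw [pvCand, String.toList_append, h1, PySem.Int.toList_toStr, pvToChars_eq]
  rfl

lemma pvDigit_bounds (c : Char) (h : PySem.Chars.isdigit c = true) :
    48 ≤ c.toNat ∧ c.toNat ≤ 57 := by
  simp [PySem.Chars.isdigit] at h
  obtain ⟨h1, h2⟩ := h
  simp [Char.le_def] at h1 h2
  exact ⟨h1, h2⟩

lemma pvDigitChar_isdigit (r : Nat) (h : r < 10) :
    PySem.Chars.isdigit (Nat.digitChar r) = true := by
  interval_cases r <;> decide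

lemma pvDigitChar_toNat (r : Nat) (h : r < 10) : (Nat.digitChar r).toNat - 48 = r := by
  interval_cases r <;> decide

lemma pvDigitChar_inv (c : Char) (h : PySem.Chars.isdigit c = true) :
    Nat.digitChar (c.toNat - 48) = c := by
  obtain ⟨hlo, hhi⟩ := pvDigit_bounds c h
  have hc : c = Char.ofNat c.toNat := (Char.ofNat_toNat c).symm
  set k := c.toNat with hk
  interval_cases k <;> (rw [hc]; decide)

lemma pvDigitChar_ne_zero (r : Nat) (h1 : 1 ≤ r) (h2 : r < 10) : Nat.digitChar r ≠ '0' := by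
  interval_cases r <;> decide

lemma pvDigs_ne_nil (n : Nat) : pvDigs n ≠ [] := by
  rw [pvDigs]
  split_ifs <;> simp

lemma pvDigs_all_digit (n : Nat) : ∀ c ∈ pvDigs n, PySem.Chars.isdigit c = true := by
  induction n using pvDigs.induct with
  | case1 n h =>
    rw [pvDigs, dif_pos h]
    intro c hc
    simp at hc
    subst hc
    exact pvDigitChar_isdigit n h
  | case2 n h ih =>
    rw [pvDigs, dif_neg h]
    intro c hc
    rcases List.mem_append.mp hc with hc | hc
    · exact ih c hc
    · simp at hc
      subst hc
      exact pvDigitChar_isdigit _ (Nat.mod_lt _ (by omega))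

lemma pvDigs_head (n : Nat) (h : 1 ≤ n) : (pvDigs n).head? ≠ some '0' := by
  induction n using pvDigs.induct with
  | case1 n hn =>
    rw [pvDigs, dif_pos hn]
    simpa using pvDigitChar_ne_zero n h hn
  | case2 n hn ih =>
    rw [pvDigs, dif_neg hn]
    obtain ⟨a, t, he⟩ := List.exists_cons_of_ne_nil (pvDigs_ne_nil (n / 10))
    have h10 : 1 ≤ n / 10 := by omega
    have := ih h10
    rw [he] at this ⊢
    simpa using this

lemma pvVal_append_singleton (cs : List Char) (c : Char) :
    pvVal (cs ++ [c]) = pvVal cs * 10 + (c.toNat - 48) := by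
  simp [pvVal, List.foldl_append]

lemma pvVal_pvDigs (n : Nat) : pvVal (pvDigs n) = n := by
  induction n using pvDigs.induct with
  | case1 n h =>
    rw [pvDigs, dif_pos h]
    simp [pvVal, pvDigitChar_toNat n h]
  | case2 n h ih =>
    rw [pvDigs, dif_neg h]
    rw [pvVal_append_singleton, ih, pvDigitChar_toNat _ (Nat.mod_lt _ (by omega))]
    omega

lemma pvFoldl_le (cs : List Char) : ∀ a : Nat, a ≤ cs.foldl (fun a c => a * 10 + (c.toNat - 48)) a := by
  induction cs with
  | nil => intro a; simp
  | cons c t ih =>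
    intro a
    simp only [List.foldl_cons]
    calc a ≤ a * 10 + (c.toNat - 48) := by omega
    _ ≤ _ := ih _

lemma pvVal_pos (h : Char) (t : List Char) (hd : PySem.Chars.isdigit h = true) (hz : h ≠ '0') :
    1 ≤ pvVal (h :: t) := by
  have hb := pvDigit_bounds h hd
  have h49 : 49 ≤ h.toNat := by
    rcases Nat.lt_or_ge h.toNat 49 with hl | hg
    · exfalso
      have h48 : h.toNat - 48 = 0 := by omega
      have := pvDigitChar_inv h hd
      rw [h48] at this
      exact hz this.symm
    · exact hg
  have : pvVal (h :: t) = t.foldl (fun a c => a * 10 + (c.toNat - 48)) (0 * 10 + (h.toNat - 48)) := by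
    simp [pvVal]
  rw [this]
  calc (1 : Nat) ≤ 0 * 10 + (h.toNat - 48) := by omega
  _ ≤ _ := pvFoldl_le t _

lemma pvDigs_of_canonical : ∀ ds : List Char, (∀ c ∈ ds, PySem.Chars.isdigit c = true) → ds ≠ [] →
    (ds = ['0'] ∨ ds.head? ≠ some '0') → pvDigs (pvVal ds) = ds := by
  intro ds
  induction ds using List.reverseRecOn with
  | nil => intro _ hne _; exact absurd rfl hne
  | append_singleton ds' c ih =>
    intro hdig hne hz
    have hcdig : PySem.Chars.isdigit c = true := hdig c (by simp)
    have hdc : c.toNat - 48 < 10 := by have := pvDigit_bounds c hcdig; omega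
    rw [pvVal_append_singleton]
    cases ds' with
    | nil =>
      have hv : pvVal ([] : List Char) = 0 := by simp [pvVal]
      rw [hv, pvDigs, dif_pos (by omega)]
      simp [pvDigitChar_inv c hcdig]
    | cons hch t =>
      have hh : hch ≠ '0' := by
        rcases hz with hz | hz
        · exfalso
          have := congrArg List.length hz
          simp at this
        · simpa using hz
      have hpos : 1 ≤ pvVal (hch :: t) := pvVal_pos hch t (hdig hch (by simp)) hh
      rw [pvDigs, dif_neg (by omega)]
      have hdiv : (pvVal (hch :: t) * 10 + (c.toNat - 48)) / 10 = pvVal (hch :: t) := by omega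
      have hmod : (pvVal (hch :: t) * 10 + (c.toNat - 48)) % 10 = c.toNat - 48 := by omega
      rw [hdiv, hmod, pvDigitChar_inv c hcdig,
        ih (fun x hx => hdig x (by simp at hx ⊢; tauto)) (by simp) (Or.inr (by simpa using hh))]

lemma pvSuffix_toList (s : String) :
    (PySem.Str.slice s (some 4) none).toList = s.toList.drop 4 := by
  simp [pysem]

lemma pvParse_iff (s : String) (n : Nat) : pvParseSeed s = some n ↔ s = pvCand n := by
  constructor
  · intro h
    simp only [pvParseSeed] at h
    split_ifs at h with hsw hcond
    simp only [pysem] at hsw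
    obtain ⟨suf, hsuf⟩ := hsw
    have hs4 : s.toList = 's' :: 'e' :: 'e' :: 'd' :: suf := by
      rw [← hsuf]; rfl
    have hsl : (PySem.Str.slice s (some 4) none).toList = suf := by
      rw [pvSuffix_toList, hs4]
      rfl
    simp only [Bool.and_eq_true, Bool.or_eq_true] at hcond
    obtain ⟨hdig, hzero⟩ := hcond
    rw [PySem.Str.strIsdigit_eq, hsl] at hdig
    simp only [PySem.Chars.strIsdigit, Bool.and_eq_true, List.all_eq_true,
      Bool.not_eq_eq_eq_not, Bool.not_true, List.isEmpty_eq_false_iff] at hdig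
    obtain ⟨hne, hall⟩ := hdig
    have hz' : suf = ['0'] ∨ suf.head? ≠ some '0' := by
      rcases hzero with hzero | hzero
      · left
        have : PySem.Str.slice s (some 4) none = "0" := by simpa using hzero
        rw [← hsl, this]
        decide
      · right
        have hls : PySem.List.slice s.toList (some 4) none = suf := by
          have hdrop : PySem.List.slice s.toList (some 4) none = s.toList.drop 4 := by
            simp [pysem]
          rw [hdrop, hs4]
          rfl
        simp only [pysem, Bool.not_eq_true', beq_eq_false_iff_ne, ne_eq] at hzero
        rw [hls] at hzero
        rwa [List.head?_eq_getElem?]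
    have hval : pvVal suf = n := by
      have := Option.some.inj h
      rw [hsl] at this
      exact this
    have hcanon := pvDigs_of_canonical suf hall hne hz'
    rw [hval] at hcanon
    apply String.toList_inj.mp
    rw [pvCand_toList, hs4, hcanon]
  · intro h
    subst h
    simp only [pvParseSeed]
    have htl := pvCand_toList n
    have hsl : (PySem.Str.slice (pvCand n) (some 4) none).toList = pvDigs n := by
      rw [pvSuffix_toList, htl]
      rfl
    have hsw : PySem.Str.startswith (pvCand n) "seed" = true := by
      simp only [pysem]
      exact ⟨pvDigs n, by rw [htl]; rfl⟩
    rw [if_pos hsw]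
    have hdig : PySem.Str.strIsdigit (PySem.Str.slice (pvCand n) (some 4) none) = true := by
      rw [PySem.Str.strIsdigit_eq, hsl]
      simp only [PySem.Chars.strIsdigit, Bool.and_eq_true, List.all_eq_true,
        Bool.not_eq_eq_eq_not, Bool.not_true, List.isEmpty_eq_false_iff]
      exact ⟨pvDigs_ne_nil n, pvDigs_all_digit n⟩
    have hzero : ((PySem.Str.slice (pvCand n) (some 4) none == "0") ||
        !(PySem.Str.pyGet? (PySem.Str.slice (pvCand n) (some 4) none) 0 == some '0')) = true := by
      rcases Nat.eq_zero_or_pos n with hn0 | hn1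
      · subst hn0
        have h0 : PySem.Str.slice (pvCand 0) (some 4) none = "0" := by
          apply String.toList_inj.mp
          rw [hsl, pvDigs]
          decide
        rw [h0]
        simp
      · rw [Bool.or_eq_true]
        right
        have hh := pvDigs_head n hn1
        have hls : PySem.List.slice (pvCand n).toList (some 4) none = pvDigs n := by
          have hdrop : PySem.List.slice (pvCand n).toList (some 4) none = (pvCand n).toList.drop 4 := by
            simp [pysem]
          rw [hdrop, htl]
          rfl
        simp only [pysem, Bool.not_eq_true', beq_eq_false_iff_ne, ne_eq]
        rw [hls, ← List.head?_eq_getElem?]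
        exact hh
    rw [if_pos (by rw [hdig, hzero]; rfl)]
    rw [show ((PySem.Str.slice (pvCand n) (some 4) none).toList.foldl
      (fun a c => a * 10 + (c.toNat - 48)) 0) = pvVal (PySem.Str.slice (pvCand n) (some 4) none).toList from rfl]
    rw [hsl, pvVal_pvDigs]

lemma pvMem_pvUsed (occ : List String) (n : Nat) :
    n ∈ pvUsed occ ↔ ∃ s ∈ occ, pvParseSeed s = some n := by
  suffices h : ∀ (l : List String) (acc : PySem.Set Nat),
      (n ∈ l.foldl (fun used name =>
        match pvParseSeed name with
        | some k => used.add k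
        | none => used) acc ↔ n ∈ acc ∨ ∃ s ∈ l, pvParseSeed s = some n) by
    rw [pvUsed, h occ (PySem.Set.ofList [])]
    simp
  intro l
  induction l with
  | nil => intro acc; simp
  | cons a tl ih =>
    intro acc
    simp only [List.foldl_cons]
    cases hpa : pvParseSeed a with
    | none =>
      rw [ih acc]
      constructor
      · rintro (h | ⟨s, hs, hp⟩)
        · exact Or.inl h
        · exact Or.inr ⟨s, List.mem_cons_of_mem _ hs, hp⟩
      · rintro (h | ⟨s, hs, hp⟩)
        · exact Or.inl h
        · rcases List.mem_cons.mp hs with rfl | hs'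
          · rw [hpa] at hp
            cases hp
          · exact Or.inr ⟨s, hs', hp⟩
    | some k =>
      rw [ih (acc.add k), PySem.Set.mem_add]
      constructor
      · rintro ((h | rfl) | ⟨s, hs, hp⟩)
        · exact Or.inl h
        · exact Or.inr ⟨a, by simp, hpa⟩
        · exact Or.inr ⟨s, List.mem_cons_of_mem _ hs, hp⟩
      · rintro (h | ⟨s, hs, hp⟩)
        · exact Or.inl (Or.inl h)
        · rcases List.mem_cons.mp hs with rfl | hs'
          · rw [hpa] at hp
            exact Or.inl (Or.inr (Option.some.inj hp).symm)
          · exact Or.inr ⟨s, hs', hp⟩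

lemma pvUsed_nodup (occ : List String) : (pvUsed occ).Nodup := by
  suffices h : ∀ (l : List String) (acc : PySem.Set Nat), acc.Nodup →
      (l.foldl (fun used name =>
        match pvParseSeed name with
        | some k => used.add k
        | none => used) acc).Nodup by
    exact h occ (PySem.Set.ofList []) (PySem.Set.nodup_ofList [])
  intro l
  induction l with
  | nil => intro acc hacc; simpa using hacc
  | cons a tl ih =>
    intro acc hacc
    simp only [List.foldl_cons]
    apply ih
    cases hpa : pvParseSeed a with
    | none => simpa [hpa] using hacc
    | some k => simpa [hpa] using PySem.Set.nodup_add acc k hacc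

lemma pvUsed_len (occ : List String) : (pvUsed occ).length ≤ occ.length := by
  suffices h : ∀ (l : List String) (acc : PySem.Set Nat),
      (l.foldl (fun used name =>
        match pvParseSeed name with
        | some k => used.add k
        | none => used) acc).length ≤ acc.length + l.length by
    simpa [pvUsed, PySem.Set.ofList] using h occ (PySem.Set.ofList [])
  intro l
  induction l with
  | nil => intro acc; simp
  | cons a tl ih =>
    intro acc
    simp only [List.foldl_cons, List.length_cons]
    cases hpa : pvParseSeed a with
    | none =>
      calc _ ≤ acc.length + tl.length := by simpa [hpa] using ih acc
      _ ≤ _ := by omega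
    | some k =>
      have hadd : (acc.add k).length ≤ acc.length + 1 := by
        simp only [PySem.Set.add]
        split_ifs <;> simp
      calc _ ≤ (acc.add k).length + tl.length := by simpa [hpa] using ih (acc.add k)
      _ ≤ _ := by omega

lemma pvExists_free (used : List Nat) (h : used.Nodup) : ∃ m, m ≤ used.length ∧ m ∉ used := by
  by_contra hc
  push Not at hc
  have hsub : List.range (used.length + 1) ⊆ used := by
    intro x hx
    simp only [List.mem_range] at hx
    exact hc x (by omega)
  have hle : (List.range (used.length + 1)).length ≤ used.length := by
    calc (List.range (used.length + 1)).length
        = (List.range (used.length + 1)).toFinset.card :=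
          (List.toFinset_card_of_nodup (List.nodup_range)).symm
      _ ≤ used.toFinset.card := Finset.card_le_card (by
          intro x hx
          simp only [List.mem_toFinset] at hx ⊢
          exact hsub hx)
      _ ≤ used.length := used.toFinset_card_le
  simp at hle

lemma pvALoop_eq (occ : List String) : ∀ (fuel affix : Nat),
    pvALoop occ affix fuel = pvCand (pvGenLoop (fun n => decide (pvCand n ∈ occ)) affix fuel) := by
  intro fuel
  induction fuel with
  | zero => intro affix; rfl
  | succ fuel ih =>
    intro affix
    simp only [pvALoop, pvGenLoop]
    by_cases hm : pvCand affix ∈ occ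
    · rw [if_pos (show ("seed" ++ PySem.Int.toStr (affix : Int)) ∈ occ from hm),
        if_pos (by simpa using hm), ih]
    · rw [if_neg (show ¬ ("seed" ++ PySem.Int.toStr (affix : Int)) ∈ occ from hm),
        if_neg (by simpa using hm)]
      rfl

lemma pvFindFree_eq (used : PySem.Set Nat) : ∀ (fuel affix : Nat),
    pvFindFree used affix fuel = pvGenLoop (fun n => decide (n ∈ used)) affix fuel := by
  intro fuel
  induction fuel with
  | zero => intro affix; rfl
  | succ fuel ih =>
    intro affix
    simp only [pvFindFree, pvGenLoop]
    by_cases hm : affix ∈ used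
    · rw [if_pos hm, if_pos (by simpa using hm), ih]
    · rw [if_neg hm, if_neg (by simpa using hm)]

lemma pvGenLoop_congr_fuel (p : Nat → Bool) :
    ∀ (f1 f2 affix m : Nat), affix ≤ m → p m = false → m < affix + f1 → m < affix + f2 →
    pvGenLoop p affix f1 = pvGenLoop p affix f2 := by
  intro f1
  induction f1 with
  | zero => intro f2 affix m h1 h2 h3 h4; omega
  | succ f1 ih =>
    intro f2 affix m hle hpm h3 h4
    cases f2 with
    | zero => omega
    | succ f2 =>
      simp only [pvGenLoop]
      by_cases hp : p affix = true
      · rw [if_pos hp, if_pos hp]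
        have hne : affix ≠ m := by
          intro he
          rw [he, hpm] at hp
          exact absurd hp (by simp)
        exact ih f2 (affix + 1) m (by omega) hpm (by omega) (by omega)
      · rw [if_neg hp, if_neg hp]

-- ===== VERDICT (by name: the statement is the Claim_ definition above) =====
theorem generate_random_field_name_py_spec : Claim_equal_generate_random_field_name_py := by
  intro occ _
  unfold Spec_generate_random_field_name_py
  unfold generate_random_field_name_py generate_random_field_name_py_alt
  rw [pvALoop_eq occ]
  show pvCand (pvGenLoop (fun n => decide (pvCand n ∈ occ)) 0 (occ.length + 1)) =
    pvCand (pvFindFree (pvUsed occ) 0 ((pvUsed occ).length + 1))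
  rw [pvFindFree_eq (pvUsed occ)]
  obtain ⟨m, hmle, hmnot⟩ := pvExists_free (pvUsed occ) (pvUsed_nodup occ)
  have hp : (fun n => decide (pvCand n ∈ occ)) = (fun n => decide (n ∈ pvUsed occ)) := by
    funext n
    rw [decide_eq_decide, pvMem_pvUsed]
    constructor
    · intro hmem
      exact ⟨pvCand n, hmem, (pvParse_iff _ _).mpr rfl⟩
    · rintro ⟨s, hs, hps⟩
      rwa [(pvParse_iff _ _).mp hps] at hs
  rw [hp]
  show pvCand _ = pvCand _
  congr 1
  exact pvGenLoop_congr_fuel _ (occ.length + 1) ((pvUsed occ).length + 1) 0 m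
    (by omega) (by simp [hmnot]) (by have := pvUsed_len occ; omega) (by omega)
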